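-- pv_equiv track=rewrite | github.com/HadrielTzuk/tip-marketplace | Integrations/Splunk/Managers/UtilsManager.py | get_less_possible_combinations
-- ===== SOURCE A (Python) =====
-- def get_less_possible_combinations(multi_value_dict):
--     # calculate maximum length of multivalues
--     result = []
--     if not multi_value_dict:
--         return result
--
--     max_length = len(max(multi_value_dict.values(), key=len))
--     for i in range(max_length):
--         current_combination = {}
--         for key, multi_value in multi_value_dict.items():
--             try:
--                 current_combination[key] = multi_value[i]
--             except IndexError:
--                 current_combination[key] = None
--         result.append(current_combination)
--     return result
-- ===== SOURCE B (Python) =====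
-- def get_less_possible_combinations(multi_value_dict):
--     # Transpose the value columns row by row (zip_longest style) instead of
--     # indexing each list with try/except per cell.
--     result = []
--     if not multi_value_dict:
--         return result
--     keys = list(multi_value_dict.keys())
--     cols = [list(v) for v in multi_value_dict.values()]
--     while any(cols):
--         row = [c[0] if c else None for c in cols]
--         cols = [c[1:] for c in cols]
--         result.append(dict(zip(keys, row)))
--     return result
-- ===== Notes on version B (the rewrite author's own statement) =====
-- stated objective: alternative
-- what changed: Replaces the max-length computation plus the nested index loop with try/except by a column-parallel transposition: peel the heads of all value lists while any column is nonempty and zip each produced row with the keys.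
import Mathlib
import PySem

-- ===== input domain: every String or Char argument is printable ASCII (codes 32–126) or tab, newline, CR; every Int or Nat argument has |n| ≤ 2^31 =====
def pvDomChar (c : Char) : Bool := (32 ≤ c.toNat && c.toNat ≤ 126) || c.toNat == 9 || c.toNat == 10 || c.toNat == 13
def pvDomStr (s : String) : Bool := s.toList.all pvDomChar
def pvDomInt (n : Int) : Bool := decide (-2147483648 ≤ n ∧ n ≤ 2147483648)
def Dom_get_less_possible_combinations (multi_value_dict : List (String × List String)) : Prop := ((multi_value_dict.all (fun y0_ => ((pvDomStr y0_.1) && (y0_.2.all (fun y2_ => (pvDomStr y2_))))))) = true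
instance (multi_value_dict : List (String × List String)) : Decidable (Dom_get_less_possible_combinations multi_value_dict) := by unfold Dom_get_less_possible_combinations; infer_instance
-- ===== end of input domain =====

-- B replaces A's max-length + indexed nested loop (try/except per cell) by a
-- column-parallel transposition (peel heads while any column is nonempty); alternative, not faster.

-- ===== PORT A =====
def get_less_possible_combinations (multi_value_dict : List (String × List String)) : List (List (String × Option String)) :=
  if multi_value_dict.isEmpty then []
  else
    match PySem.List.max? (multi_value_dict.map Prod.snd) (fun v => (v.length : Int)) with
    | none => []  -- unreachable: the dict is nonempty, so max() has an argument
    | some m =>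
      (PySem.List.pyRange 0 (m.length : Int) 1).map (fun i =>
        (multi_value_dict.foldl
          (fun (d : PySem.Dict String (Option String)) kv =>
            d.insert kv.1 (PySem.List.pyGet? kv.2 i))  -- try: v[i]  except IndexError: None
          PySem.Dict.empty).items)

-- ===== PORT B =====
-- termination helper for the head-peeling loop (cited by zipLongestRows's decreasing_by)
theorem pvSumTailLe (cols : List (List String)) :
    ((cols.map List.tail).map List.length).sum ≤ (cols.map List.length).sum := by
  induction cols with
  | nil => simp
  | cons c cs ih =>
    simp only [List.map_cons, List.sum_cons, List.length_tail]
    omega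

theorem pvSumTailLt (cols : List (List String))
    (h : cols.any (fun c => !c.isEmpty) = true) :
    ((cols.map List.tail).map List.length).sum < (cols.map List.length).sum := by
  induction cols with
  | nil => simp at h
  | cons c cs ih =>
    simp only [List.any_cons, Bool.or_eq_true] at h
    simp only [List.map_cons, List.sum_cons, List.length_tail]
    rcases h with h | h
    · have := pvSumTailLe cs
      cases c with
      | nil => simp at h
      | cons x xs => simp only [List.length_cons]; omega
    · have := ih h
      omega

def zipLongestRows (cols : List (List String)) : List (List (Option String)) :=
  if h : cols.any (fun c => !c.isEmpty) = true then
    (cols.map List.head?) :: zipLongestRows (cols.map List.tail)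
  else []
termination_by (cols.map List.length).sum
decreasing_by simpa using pvSumTailLt cols h

def get_less_possible_combinations_alt (multi_value_dict : List (String × List String)) : List (List (String × Option String)) :=
  if multi_value_dict.isEmpty then []
  else
    let keys := multi_value_dict.map Prod.fst
    (zipLongestRows (multi_value_dict.map Prod.snd)).map
      (fun row => (PySem.Dict.ofList (keys.zip row)).items)

-- ===== PRECONDITION & SPEC =====
def Spec_get_less_possible_combinations (multi_value_dict : List (String × List String)) (out : List (List (String × Option String))) : Prop := out = get_less_possible_combinations_alt multi_value_dict
instance (multi_value_dict : List (String × List String)) (out : List (List (String × Option String))) : Decidable (Spec_get_less_possible_combinations multi_value_dict out) := by unfold Spec_get_less_possible_combinations; infer_instance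

-- ===== CLAIM (what is proved, stated in full; the proofs are below) =====
def Claim_equal_get_less_possible_combinations : Prop := ∀ (multi_value_dict : List (String × List String)), Dom_get_less_possible_combinations multi_value_dict → Spec_get_less_possible_combinations multi_value_dict (get_less_possible_combinations multi_value_dict)

-- ===== LEMMAS AND PROOFS =====

-- folding max over Nat with any accumulator
theorem foldl_max_acc (ls : List Nat) (a : Nat) :
    ls.foldl max a = max a (ls.foldl max 0) := by
  induction ls generalizing a with
  | nil => simp
  | cons x xs ih =>
    simp only [List.foldl_cons]
    rw [ih (max a x), ih (max 0 x)]
    omega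

theorem mem_le_foldl_max (ls : List Nat) (x : Nat) (hx : x ∈ ls) :
    x ≤ ls.foldl max 0 := by
  induction ls with
  | nil => simp at hx
  | cons y ys ih =>
    simp only [List.foldl_cons]
    rw [foldl_max_acc]
    rcases List.mem_cons.mp hx with h | h
    · omega
    · have := ih h; omega

theorem foldl_max_zero (ls : List Nat) (h : ∀ x ∈ ls, x = 0) :
    ls.foldl max 0 = 0 := by
  induction ls with
  | nil => rfl
  | cons x xs ih =>
    have hx : x = 0 := h x (by simp)
    subst hx
    simp only [List.foldl_cons, Nat.max_self]
    exact ih (fun y hy => h y (List.mem_cons_of_mem _ hy))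

theorem foldl_max_pred (ls : List Nat) (a : Nat) :
    (ls.map (fun n => n - 1)).foldl max (a - 1) = ls.foldl max a - 1 := by
  induction ls generalizing a with
  | nil => simp
  | cons x xs ih =>
    simp only [List.map_cons, List.foldl_cons]
    have : max (a - 1) (x - 1) = max a x - 1 := by omega
    rw [this, ih]

-- the peeled rows ARE the indexed rows
theorem zipLongestRows_eq (n : Nat) :
    ∀ (cols : List (List String)),
      (cols.map List.length).foldl max 0 = n →
      zipLongestRows cols = (List.range n).map (fun j => cols.map (fun col => col[j]?)) := by
  induction n with
  | zero =>
    intro cols hM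
    have hall : cols.any (fun c => !c.isEmpty) = false := by
      by_contra h
      rcases List.any_eq_true.mp (Bool.of_not_eq_false h) with ⟨c, hc, hne⟩
      have hlen : c.length ∈ cols.map List.length := List.mem_map_of_mem hc
      have := mem_le_foldl_max _ _ hlen
      rw [hM] at this
      have : c = [] := List.eq_nil_of_length_eq_zero (by omega)
      subst this; simp at hne
    rw [zipLongestRows]
    simp [hall]
  | succ n ih =>
    intro cols hM
    have hany : cols.any (fun c => !c.isEmpty) = true := by
      by_contra h
      have hz : (cols.map List.length).foldl max 0 = 0 := by
        apply foldl_max_zero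
        intro x hx
        rcases List.mem_map.mp hx with ⟨c, hc, hcx⟩
        have : c.isEmpty := by
          by_contra hne
          exact h (List.any_eq_true.mpr ⟨c, hc, by simp [hne]⟩)
        have : c = [] := List.isEmpty_iff.mp this
        subst this; simpa using hcx.symm
      omega
    rw [zipLongestRows, dif_pos hany]
    have htail : ((cols.map List.tail).map List.length).foldl max 0 = n := by
      have he : (cols.map List.tail).map List.length = (cols.map List.length).map (fun n => n - 1) := by
        simp [List.map_map, Function.comp_def, List.length_tail]
      rw [he]
      have hp := foldl_max_pred (cols.map List.length) 0
      simp only [Nat.zero_sub] at hp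
      rw [hp, hM]
      omega
    rw [ih _ htail, List.range_succ_eq_map]
    simp only [List.map_cons, List.map_map, Function.comp_def]
    congr 1
    · simp [List.head?_eq_getElem?]
    · apply List.map_congr_left
      intro j _
      apply List.map_congr_left
      intro colx _
      simp [List.getElem?_tail, Nat.succ_eq_add_one]

-- the max-with-len loop of A, with its step pulled out
def pvStep (acc : Option (List String)) (x : List String) : Option (List String) :=
  match acc with
  | none => some x
  | some m => if ((m.length : Int) < (x.length : Int)) then some x else some m

theorem max?_eq_foldl_pvStep (xs : List (List String)) :
    PySem.List.max? xs (fun v => (v.length : Int)) = xs.foldl pvStep none := by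
  rw [PySem.List.max?]
  congr 1
  funext acc x
  cases acc <;> rfl

theorem max?_len (xs : List (List String)) (m0 : List String) :
    ∃ r, xs.foldl pvStep (some m0) = some r ∧
      r.length = (xs.map List.length).foldl max m0.length := by
  induction xs generalizing m0 with
  | nil => exact ⟨m0, rfl, by simp⟩
  | cons x xs ih =>
    simp only [List.foldl_cons, List.map_cons, pvStep]
    by_cases h : (m0.length : Int) < (x.length : Int)
    · rcases ih x with ⟨r, h1, h2⟩
      refine ⟨r, by rw [if_pos h]; exact h1, ?_⟩
      rw [h2]
      have : max m0.length x.length = x.length := by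
        have := Int.ofNat_lt.mp h; omega
      rw [this]
    · rcases ih m0 with ⟨r, h1, h2⟩
      refine ⟨r, by rw [if_neg h]; exact h1, ?_⟩
      rw [h2]
      have : max m0.length x.length = m0.length := by
        have : ¬ (m0.length < x.length) := fun hc => h (Int.ofNat_lt.mpr hc)
        omega
      rw [this]

-- one row: A's insert loop over the dict equals dict(zip(keys, row))
theorem row_eq (mvd : List (String × List String)) (j : Nat) :
    (mvd.foldl
      (fun (d : PySem.Dict String (Option String)) kv =>
        d.insert kv.1 (PySem.List.pyGet? kv.2 (j : Int)))
      PySem.Dict.empty)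
    = PySem.Dict.ofList ((mvd.map Prod.fst).zip ((mvd.map Prod.snd).map (fun col => col[j]?))) := by
  rw [PySem.Dict.ofList, PySem.Dict.update, List.map_map]
  rw [show ((fun col : List String => col[j]?) ∘ Prod.snd)
        = (fun kv : String × List String => kv.2[j]?) from rfl]
  rw [List.zip_map', List.foldl_map]
  congr 1
  funext d kv
  simp

-- ===== VERDICT (by name: the statement is the Claim_ definition above) =====
theorem get_less_possible_combinations_spec : Claim_equal_get_less_possible_combinations := by
  intro mvd _
  unfold Spec_get_less_possible_combinations get_less_possible_combinations get_less_possible_combinations_alt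
  cases mvd with
  | nil => simp
  | cons kv rest =>
    rcases max?_len (rest.map Prod.snd) kv.2 with ⟨r, hfold, hlen⟩
    have hmax : PySem.List.max? ((kv :: rest).map Prod.snd) (fun v => (v.length : Int)) = some r := by
      rw [max?_eq_foldl_pvStep]
      simp only [List.map_cons, List.foldl_cons]
      exact hfold
    have hM : (((kv :: rest).map Prod.snd).map List.length).foldl max 0 = r.length := by
      simp only [List.map_cons, List.foldl_cons, Nat.zero_max]
      rw [hlen, List.map_map]
    simp only [List.isEmpty_cons, Bool.false_eq_true, if_false, hmax]
    rw [zipLongestRows_eq r.length _ hM, PySem.List.pyRange_zero_natCast,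
        List.map_map, List.map_map]
    apply List.map_congr_left
    intro j _
    simp only [Function.comp_def]
    rw [row_eq]
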